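-- pv_equiv track=rewrite | github.com/gary-bao/ML_Pipeline_New | mutations.py | mutate_double
-- ===== SOURCE A (Python) =====
-- from typing import List
--
-- residues = ['A', 'D', 'E', 'F', 'G', 'H', 'I', 'K', 'L', 'M', 'N', 'P', 'Q', 'R', 'S', 'T', 'V', 'W', 'Y']
--
-- def mutate(peptide: str) -> List[str]:
--     non_cys_positions = [i for i, x in enumerate(peptide) if x != 'C']
--     children = sorted(set([peptide[:pos] + residue + peptide[pos+1:] for pos in non_cys_positions for residue in residues]))
--     # keep the parent also
--     if peptide not in children:
--         children.append(peptide)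
--         children.sort()
--     return children
--
-- def mutate_double(peptide: str) -> List[str]:
--     children = []
--     for child in mutate(peptide):
--         children += mutate(child)
--     children = sorted(set(children))
--     if peptide not in children:
--         children.append(peptide)
--         children.sort()
--     return children
-- ===== SOURCE B (Python) =====
-- from typing import List
--
-- residues = ['A', 'D', 'E', 'F', 'G', 'H', 'I', 'K', 'L', 'M', 'N', 'P', 'Q', 'R', 'S', 'T', 'V', 'W', 'Y']
--
-- def mutate_double(peptide: str) -> List[str]:
--     # One direct enumeration: 0 changes (the peptide itself), 1 change at a
--     # non-Cys position, 2 changes at an ordered pair of non-Cys positions.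
--     positions = [i for i, x in enumerate(peptide) if x != 'C']
--     out = {peptide}
--     for i in positions:
--         for r in residues:
--             l = list(peptide)
--             l[i] = r
--             out.add(''.join(l))
--     for a, i in enumerate(positions):
--         for j in positions[a + 1:]:
--             for r in residues:
--                 for s in residues:
--                     l = list(peptide)
--                     l[i] = r
--                     l[j] = s
--                     out.add(''.join(l))
--     return sorted(out)
-- ===== Notes on version B (the rewrite author's own statement) =====
-- stated objective: alternative
-- what changed: B replaces A's double application of mutate (each call building, deduplicating and sorting its own child list, then flat-concatenating and re-sorting) with one direct enumeration of 0-, 1- and 2-position substitutions at non-Cys positions, collected into a single set and sorted once.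
import Mathlib
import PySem

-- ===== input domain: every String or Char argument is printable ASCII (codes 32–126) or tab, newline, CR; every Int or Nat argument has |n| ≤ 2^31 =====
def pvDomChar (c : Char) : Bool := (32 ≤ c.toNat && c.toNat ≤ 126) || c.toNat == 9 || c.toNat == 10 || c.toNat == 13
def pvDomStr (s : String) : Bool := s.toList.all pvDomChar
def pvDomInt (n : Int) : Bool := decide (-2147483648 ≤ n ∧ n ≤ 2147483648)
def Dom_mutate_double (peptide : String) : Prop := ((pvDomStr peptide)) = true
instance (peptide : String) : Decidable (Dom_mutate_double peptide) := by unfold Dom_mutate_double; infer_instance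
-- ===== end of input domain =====

-- B replaces A's double application of `mutate` (and its repeated sort/dedup passes) by one
-- direct enumeration of 0-, 1- and 2-position substitutions collected into a single set.

-- ===== PORT A =====
def pvResidues : List Char :=
  ['A', 'D', 'E', 'F', 'G', 'H', 'I', 'K', 'L', 'M', 'N', 'P', 'Q', 'R', 'S', 'T', 'V', 'W', 'Y']

-- [i for i, x in enumerate(peptide) if x != 'C']  (the same comprehension opens Source A's mutate and Source B)
def pvNcp (cs : List Char) : List Int :=
  ((PySem.List.enumerate cs 0).filter (fun p => p.2 != 'C')).map (·.1)

-- peptide[:pos] + residue + peptide[pos+1:]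
def pvSubA (cs : List Char) (pos : Int) (r : Char) : String :=
  String.ofList (PySem.List.slice cs none (some pos) ++ [r] ++ PySem.List.slice cs (some (pos + 1)) none)

def pvMutate (peptide : String) : List String :=
  let cs := peptide.toList
  let non_cys_positions := pvNcp cs
  let children := PySem.List.sorted
    (PySem.Set.ofList (non_cys_positions.flatMap (fun pos => pvResidues.map (fun r => pvSubA cs pos r))))
    (fun x => x) false
  if peptide ∈ children then children
  else PySem.List.sorted (children ++ [peptide]) (fun x => x) false

def mutate_double (peptide : String) : List String :=
  let children := (pvMutate peptide).foldl (fun acc child => acc ++ pvMutate child) []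
  let children := PySem.List.sorted (PySem.Set.ofList children) (fun x => x) false
  if peptide ∈ children then children
  else PySem.List.sorted (children ++ [peptide]) (fun x => x) false

-- ===== PORT B =====
-- l = list(peptide); l[i] = r; ''.join(l)  is  cs.set i.toNat r  wrapped back into a String
-- (exact here: every i produced by the enumerate comprehension satisfies 0 ≤ i < len(peptide)).
def mutate_double_alt (peptide : String) : List String :=
  let cs := peptide.toList
  let positions := pvNcp cs
  let out : PySem.Set String := PySem.Set.ofList [peptide]
  let out := positions.foldl (fun out i =>
    pvResidues.foldl (fun out r => PySem.Set.add out (String.ofList (cs.set i.toNat r))) out) out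
  let out := (PySem.List.enumerate positions 0).foldl (fun out q =>
    (PySem.List.slice positions (some (q.1 + 1)) none).foldl (fun out j =>
      pvResidues.foldl (fun out r =>
        pvResidues.foldl (fun out s =>
          PySem.Set.add out (String.ofList ((cs.set q.2.toNat r).set j.toNat s))) out) out) out) out
  PySem.List.sorted out (fun x => x) false

-- ===== PRECONDITION & SPEC =====
def Spec_mutate_double (peptide : String) (out : List String) : Prop := out = mutate_double_alt peptide
instance (peptide : String) (out : List String) : Decidable (Spec_mutate_double peptide out) := by unfold Spec_mutate_double; infer_instance

-- ===== CLAIM (what is proved, stated in full; the proofs are below) =====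
def Claim_equal_mutate_double : Prop := ∀ (peptide : String), Dom_mutate_double peptide → Spec_mutate_double peptide (mutate_double peptide)

-- ===== LEMMAS AND PROOFS =====

theorem pvMem_ncp (cs : List Char) (i : Int) :
    i ∈ pvNcp cs ↔ ∃ (k : Nat) (h : k < cs.length), i = (k : Int) ∧ cs[k] ≠ 'C' := by
  simp only [pvNcp, List.mem_map, List.mem_filter, PySem.List.mem_enumerate_iff]
  constructor
  · rintro ⟨p, ⟨⟨k, hk, rfl⟩, hne⟩, rfl⟩
    exact ⟨k, hk, by simp, by simpa using hne⟩
  · rintro ⟨k, hk, rfl, hne⟩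
    exact ⟨((k : Int), cs[k]), ⟨⟨k, hk, by simp⟩, by simpa using hne⟩, rfl⟩

theorem pvNcp_pairwise (cs : List Char) : (pvNcp cs).Pairwise (· < ·) := by
  refine List.Pairwise.map _ (fun a b h => h) ?_
  exact (PySem.List.pairwise_lt_enumerate cs 0).filter _

theorem pvSubA_eq' (cs : List Char) (k : Nat) (hk : k < cs.length) (r : Char) :
    PySem.List.slice cs none (some ((k : Int))) ++ [r] ++ PySem.List.slice cs (some ((k : Int) + 1)) none
      = cs.set k r := by
  have h1 : PySem.List.slice cs none (some ((k : Int))) = cs.take k := PySem.List.slice_to_natCast cs k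
  have h2 : ((k : Int) + 1) = ((k + 1 : Nat) : Int) := by push_cast; ring
  rw [h1, h2, PySem.List.slice_from_natCast, List.set_eq_take_cons_drop r hk]
  simp

theorem pvMem_base (cs : List Char) (x : String) :
    x ∈ (pvNcp cs).flatMap (fun pos => pvResidues.map (fun r => pvSubA cs pos r)) ↔
      ∃ (k : Nat) (h : k < cs.length), cs[k] ≠ 'C' ∧ ∃ r ∈ pvResidues, x = String.ofList (cs.set k r) := by
  simp only [List.mem_flatMap, List.mem_map, pvMem_ncp]
  constructor
  · rintro ⟨pos, ⟨k, hk, rfl, hC⟩, r, hr, rfl⟩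
    exact ⟨k, hk, hC, r, hr, by rw [pvSubA, pvSubA_eq' cs k hk]⟩
  · rintro ⟨k, hk, hC, r, hr, rfl⟩
    exact ⟨(k : Int), ⟨k, hk, rfl, hC⟩, r, hr, by rw [pvSubA, pvSubA_eq' cs k hk]⟩

theorem pvMem_mutate (s : String) (x : String) :
    x ∈ pvMutate s ↔ x = s ∨ ∃ (k : Nat) (h : k < s.toList.length),
      s.toList[k] ≠ 'C' ∧ ∃ r ∈ pvResidues, x = String.ofList (s.toList.set k r) := by
  unfold pvMutate
  simp only []
  set base := (pvNcp s.toList).flatMap (fun pos => pvResidues.map (fun r => pvSubA s.toList pos r)) with hbase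
  have hmemC : ∀ y : String, y ∈ PySem.List.sorted (PySem.Set.ofList base) (fun x => x) false ↔
      (∃ (k : Nat) (h : k < s.toList.length), s.toList[k] ≠ 'C' ∧ ∃ r ∈ pvResidues, y = String.ofList (s.toList.set k r)) := by
    intro y
    rw [PySem.List.mem_sorted, PySem.Set.mem_ofList, pvMem_base]
  by_cases h : s ∈ PySem.List.sorted (PySem.Set.ofList base) (fun x => x) false
  · rw [if_pos h]
    rw [hmemC]
    constructor
    · exact fun hx => Or.inr hx
    · rintro (rfl | hx)
      · exact (hmemC x).mp h
      · exact hx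
  · rw [if_neg h, PySem.List.mem_sorted, List.mem_append, List.mem_singleton, hmemC]
    exact or_comm

-- the set of peptides reachable from cs in at most two substitutions at non-Cys positions
def pvDbl (cs : List Char) (x : String) : Prop :=
  x = String.ofList cs ∨
  (∃ (k : Nat) (h : k < cs.length), cs[k] ≠ 'C' ∧ ∃ r ∈ pvResidues, x = String.ofList (cs.set k r)) ∨
  (∃ (k l : Nat) (hk : k < cs.length) (hl : l < cs.length), k ≠ l ∧ cs[k] ≠ 'C' ∧ cs[l] ≠ 'C' ∧
     ∃ r ∈ pvResidues, ∃ s ∈ pvResidues, x = String.ofList ((cs.set k r).set l s))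

theorem pvMemA (p : String) (x : String) :
    x ∈ (pvMutate p).foldl (fun acc child => acc ++ pvMutate child) [] ↔ pvDbl p.toList x := by
  rw [PySem.List.foldl_append_eq_flatMap, List.nil_append, List.mem_flatMap]
  constructor
  · rintro ⟨c, hc, hx⟩
    rw [pvMem_mutate] at hc hx
    rcases hc with rfl | ⟨k, hk, hkC, r, hr, rfl⟩
    · rcases hx with rfl | ⟨k, hk, hkC, r, hr, rfl⟩
      · exact Or.inl (by simp)
      · exact Or.inr (Or.inl ⟨k, hk, hkC, r, hr, rfl⟩)
    · rcases hx with rfl | ⟨l, hl, hlC, s, hs, rfl⟩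
      · exact Or.inr (Or.inl ⟨k, hk, hkC, r, hr, rfl⟩)
      · simp only [String.toList_ofList, List.length_set] at hl hlC ⊢
        by_cases hkl : k = l
        · subst hkl
          rw [List.set_set]
          exact Or.inr (Or.inl ⟨k, hk, hkC, s, hs, rfl⟩)
        · have hlC' : p.toList[l] ≠ 'C' := by
            rw [List.getElem_set_ne hkl] at hlC; exact hlC
          exact Or.inr (Or.inr ⟨k, l, hk, hl, hkl, hkC, hlC', r, hr, s, hs, rfl⟩)
  · rintro (rfl | ⟨k, hk, hkC, r, hr, rfl⟩ | ⟨k, l, hk, hl, hkl, hkC, hlC, r, hr, s, hs, rfl⟩)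
    · refine ⟨p, ?_, ?_⟩ <;> rw [pvMem_mutate]
      · exact Or.inl rfl
      · exact Or.inl (by simp)
    · refine ⟨p, ?_, ?_⟩ <;> rw [pvMem_mutate]
      · exact Or.inl rfl
      · exact Or.inr ⟨k, hk, hkC, r, hr, rfl⟩
    · refine ⟨String.ofList (p.toList.set k r), ?_, ?_⟩ <;> rw [pvMem_mutate]
      · exact Or.inr ⟨k, hk, hkC, r, hr, rfl⟩
      · refine Or.inr ?_
        simp only [String.toList_ofList]
        refine ⟨l, by rw [List.length_set]; exact hl, ?_, s, hs, rfl⟩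
        rw [List.getElem_set_ne (by omega)]
        exact hlC

theorem pvMemFold {β : Type} (l : List β) (F : PySem.Set String → β → PySem.Set String)
    (P : β → String → Prop)
    (hF : ∀ s b x, x ∈ F s b ↔ x ∈ s ∨ P b x) (s : PySem.Set String) (x : String) :
    x ∈ l.foldl F s ↔ x ∈ s ∨ ∃ b ∈ l, P b x := by
  induction l generalizing s with
  | nil => simp
  | cons h t ih => rw [List.foldl_cons, ih]; simp [hF]; tauto

theorem pvNodupFold {β : Type} (l : List β) (F : PySem.Set String → β → PySem.Set String)
    (hF : ∀ s b, s.Nodup → (F s b).Nodup) (s : PySem.Set String) (hs : s.Nodup) :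
    (l.foldl F s).Nodup := by
  induction l generalizing s with
  | nil => exact hs
  | cons h t ih => exact ih _ (hF _ _ hs)

theorem pvPairs_iff (cs : List Char) (x : String) :
    (∃ q ∈ PySem.List.enumerate (pvNcp cs) 0, ∃ j ∈ PySem.List.slice (pvNcp cs) (some (q.1 + 1)) none,
       ∃ r ∈ pvResidues, ∃ s ∈ pvResidues, x = String.ofList ((cs.set q.2.toNat r).set j.toNat s))
    ↔ (∃ (k l : Nat) (hk : k < cs.length) (hl : l < cs.length), k ≠ l ∧ cs[k] ≠ 'C' ∧ cs[l] ≠ 'C' ∧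
       ∃ r ∈ pvResidues, ∃ s ∈ pvResidues, x = String.ofList ((cs.set k r).set l s)) := by
  have hcast : ∀ m : Nat, (0 + (m : Int)) + 1 = ((m + 1 : Nat) : Int) := by intro m; push_cast; ring
  constructor
  · rintro ⟨q, hq, j, hj, r, hr, s, hs, rfl⟩
    rw [PySem.List.mem_enumerate_iff] at hq
    obtain ⟨m, hm, rfl⟩ := hq
    rw [hcast m, PySem.List.slice_from_natCast] at hj
    obtain ⟨t, ht, rfl⟩ := List.getElem_of_mem hj
    rw [List.getElem_drop] at *
    have hi : (pvNcp cs)[m] ∈ pvNcp cs := List.getElem_mem _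
    have hjm : (pvNcp cs)[m + 1 + t]'(by simp [List.length_drop] at ht; omega) ∈ pvNcp cs := List.getElem_mem _
    obtain ⟨k, hk, hik, hkC⟩ := (pvMem_ncp cs _).mp hi
    obtain ⟨l, hl, hjl, hlC⟩ := (pvMem_ncp cs _).mp hjm
    have hlt : (pvNcp cs)[m] < (pvNcp cs)[m + 1 + t]'(by simp [List.length_drop] at ht; omega) := by
      have := List.pairwise_iff_getElem.mp (pvNcp_pairwise cs)
      exact this m (m + 1 + t) _ _ (by omega)
    have hne : k ≠ l := by
      rw [hik, hjl] at hlt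
      intro h; subst h; exact lt_irrefl _ hlt
    refine ⟨k, l, hk, hl, hne, hkC, hlC, r, hr, s, hs, ?_⟩
    simp [hik, hjl]
  · rintro ⟨k, l, hk, hl, hkl, hkC, hlC, r, hr, s, hs, rfl⟩
    have hi : (k : Int) ∈ pvNcp cs := (pvMem_ncp cs _).mpr ⟨k, hk, rfl, hkC⟩
    have hj : (l : Int) ∈ pvNcp cs := (pvMem_ncp cs _).mpr ⟨l, hl, rfl, hlC⟩
    obtain ⟨m, hmlen, hm⟩ := List.getElem_of_mem hi
    obtain ⟨b, hblen, hb⟩ := List.getElem_of_mem hj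
    have hmb : m ≠ b := by
      intro h; subst h; rw [hm] at hb; exact hkl (by exact_mod_cast hb)
    rcases Nat.lt_or_ge m b with h | h
    · refine ⟨(0 + (m : Int), (pvNcp cs)[m]), ?_, (pvNcp cs)[b], ?_, r, hr, s, hs, ?_⟩
      · exact (PySem.List.mem_enumerate_iff _ _ _).mpr ⟨m, hmlen, rfl⟩
      · rw [hcast m, PySem.List.slice_from_natCast]
        have hlen : b - (m + 1) < ((pvNcp cs).drop (m + 1)).length := by
          rw [List.length_drop]; omega
        have : ((pvNcp cs).drop (m + 1))[b - (m + 1)] = (pvNcp cs)[b] := by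
          rw [List.getElem_drop]; congr 1; omega
        exact this ▸ List.getElem_mem _
      · rw [hm, hb]; simp
    · have h' : b < m := by omega
      refine ⟨(0 + (b : Int), (pvNcp cs)[b]), ?_, (pvNcp cs)[m], ?_, s, hs, r, hr, ?_⟩
      · exact (PySem.List.mem_enumerate_iff _ _ _).mpr ⟨b, hblen, rfl⟩
      · rw [hcast b, PySem.List.slice_from_natCast]
        have hlen : m - (b + 1) < ((pvNcp cs).drop (b + 1)).length := by
          rw [List.length_drop]; omega
        have : ((pvNcp cs).drop (b + 1))[m - (b + 1)] = (pvNcp cs)[m] := by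
          rw [List.getElem_drop]; congr 1; omega
        exact this ▸ List.getElem_mem _
      · rw [hm, hb]; simp; rw [List.set_comm s r (by omega : l ≠ k)]

theorem pvMemB (p : String) (x : String) :
    x ∈ ((PySem.List.enumerate (pvNcp p.toList) 0).foldl (fun out q =>
        (PySem.List.slice (pvNcp p.toList) (some (q.1 + 1)) none).foldl (fun out j =>
          pvResidues.foldl (fun out r =>
            pvResidues.foldl (fun out s =>
              PySem.Set.add out (String.ofList ((p.toList.set q.2.toNat r).set j.toNat s))) out) out) out)
        ((pvNcp p.toList).foldl (fun out i =>
          pvResidues.foldl (fun out r => PySem.Set.add out (String.ofList (p.toList.set i.toNat r))) out)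
          (PySem.Set.ofList [p])))
    ↔ pvDbl p.toList x := by
  rw [pvMemFold _ _ (fun q x => ∃ j ∈ PySem.List.slice (pvNcp p.toList) (some (q.1 + 1)) none,
        ∃ r ∈ pvResidues, ∃ s ∈ pvResidues, x = String.ofList ((p.toList.set q.2.toNat r).set j.toNat s))
      (by
        intro s' q x'
        rw [pvMemFold _ _ (fun j x => ∃ r ∈ pvResidues, ∃ s ∈ pvResidues,
              x = String.ofList ((p.toList.set q.2.toNat r).set j.toNat s)) (by
          intro s'' j x''
          rw [pvMemFold _ _ (fun r x => ∃ s ∈ pvResidues,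
                x = String.ofList ((p.toList.set q.2.toNat r).set j.toNat s)) (by
            intro s3 r x3
            rw [pvMemFold _ _ (fun s x => x = String.ofList ((p.toList.set q.2.toNat r).set j.toNat s))
                (by intro s4 sc x4; simp [PySem.Set.mem_add])])])])]
  rw [pvMemFold _ _ (fun i x => ∃ r ∈ pvResidues, x = String.ofList (p.toList.set i.toNat r))
      (by
        intro s' i x'
        rw [pvMemFold _ _ (fun r x => x = String.ofList (p.toList.set i.toNat r))
            (by intro s'' r x''; simp [PySem.Set.mem_add])])]
  rw [PySem.Set.mem_ofList, List.mem_singleton, pvPairs_iff]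
  unfold pvDbl
  constructor
  · rintro ((rfl | ⟨i, hi, r, hr, rfl⟩) | hpair)
    · exact Or.inl (by simp)
    · obtain ⟨k, hk, rfl, hkC⟩ := (pvMem_ncp _ _).mp hi
      exact Or.inr (Or.inl ⟨k, hk, hkC, r, hr, by simp⟩)
    · exact Or.inr (Or.inr hpair)
  · rintro (rfl | ⟨k, hk, hkC, r, hr, rfl⟩ | hpair)
    · exact Or.inl (Or.inl (by simp))
    · exact Or.inl (Or.inr ⟨(k : Int), (pvMem_ncp _ _).mpr ⟨k, hk, rfl, hkC⟩, r, hr, by simp⟩)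
    · exact Or.inr hpair

theorem pvNodupB (p : String) :
    ((PySem.List.enumerate (pvNcp p.toList) 0).foldl (fun out q =>
        (PySem.List.slice (pvNcp p.toList) (some (q.1 + 1)) none).foldl (fun out j =>
          pvResidues.foldl (fun out r =>
            pvResidues.foldl (fun out s =>
              PySem.Set.add out (String.ofList ((p.toList.set q.2.toNat r).set j.toNat s))) out) out) out)
        ((pvNcp p.toList).foldl (fun out i =>
          pvResidues.foldl (fun out r => PySem.Set.add out (String.ofList (p.toList.set i.toNat r))) out)
          (PySem.Set.ofList [p]))).Nodup := by
  apply pvNodupFold _ _ (fun s q hs => pvNodupFold _ _ (fun s j hs => pvNodupFold _ _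
    (fun s r hs => pvNodupFold _ _ (fun s sc hs => PySem.Set.nodup_add _ _ hs) _ hs) _ hs) _ hs)
  apply pvNodupFold _ _ (fun s i hs => pvNodupFold _ _ (fun s r hs => PySem.Set.nodup_add _ _ hs) _ hs)
  exact PySem.Set.nodup_ofList _

-- ===== VERDICT (by name: the statement is the Claim_ definition above) =====
theorem mutate_double_spec : Claim_equal_mutate_double := by
  intro p _
  unfold Spec_mutate_double mutate_double mutate_double_alt
  simp only []
  have hp : p ∈ PySem.List.sorted
      (PySem.Set.ofList ((pvMutate p).foldl (fun acc child => acc ++ pvMutate child) []))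
      (fun x => x) false := by
    rw [PySem.List.mem_sorted, PySem.Set.mem_ofList, pvMemA]
    exact Or.inl (by simp)
  rw [if_pos hp]
  rw [PySem.List.sorted_id_eq_sorted_id_iff_perm]
  refine (List.perm_ext_iff_of_nodup (PySem.Set.nodup_ofList _) (pvNodupB p)).mpr ?_
  intro a
  rw [PySem.Set.mem_ofList, pvMemA, pvMemB]
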